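-- pv_equiv track=rewrite | github.com/mikuzpatrik/MATRAC_Sudoku | igra.py | prestej_pojavitve
-- ===== SOURCE A (Python) =====
-- def prestej_pojavitve(nabor_seznamov):
--     stevila = []
--     for lst in nabor_seznamov:
--         for el in lst:
--             if el not in stevila:
--                 stevila.append(el)
--     opcije = []
--     for el in stevila:
--         pojavitev = 0
--         indeks = None
--         for i in range(len(nabor_seznamov)):
--             if el in nabor_seznamov[i]:
--                 pojavitev += 1
--                 indeks = i
--         if pojavitev == 1:
--             opcije.append((el, indeks))
--     return opcije
-- ===== SOURCE B (Python) =====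
-- def prestej_pojavitve(nabor_seznamov):
--     # One pass: element -> (number of distinct sublists containing it, last such index),
--     # in first-occurrence order (dict insertion order).
--     info = {}
--     for i, lst in enumerate(nabor_seznamov):
--         videno = set()
--         for el in lst:
--             if el not in videno:
--                 videno.add(el)
--                 info[el] = (info.get(el, (0, 0))[0] + 1, i)
--     return [(el, ci[1]) for el, ci in info.items() if ci[0] == 1]
-- ===== Notes on version B (the rewrite author's own statement) =====
-- stated objective: faster
-- what changed: Replaces A's dedup list plus a rescan of all sublists per distinct element with a single pass that builds an insertion-ordered dict element -> (distinct-sublist count, last index) using a per-sublist seen set, then filters the dict items.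
import Mathlib
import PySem

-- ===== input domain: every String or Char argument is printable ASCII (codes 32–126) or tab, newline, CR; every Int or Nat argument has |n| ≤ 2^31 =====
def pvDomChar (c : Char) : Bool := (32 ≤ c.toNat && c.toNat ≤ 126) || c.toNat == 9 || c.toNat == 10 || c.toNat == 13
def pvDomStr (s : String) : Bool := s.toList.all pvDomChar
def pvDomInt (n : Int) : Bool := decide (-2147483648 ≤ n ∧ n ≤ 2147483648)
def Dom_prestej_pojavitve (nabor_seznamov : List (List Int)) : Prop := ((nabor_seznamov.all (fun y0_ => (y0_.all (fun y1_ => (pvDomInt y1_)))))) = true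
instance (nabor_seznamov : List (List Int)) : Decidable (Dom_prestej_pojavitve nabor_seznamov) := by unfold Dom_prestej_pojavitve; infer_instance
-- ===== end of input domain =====

-- B replaces A's dedup list + per-element rescan of all sublists with a single pass building an
-- insertion-ordered dict element -> (distinct-sublist count, last index); measurably faster (asymptotic).

-- ===== PORT A =====
def prestej_pojavitve (nabor_seznamov : List (List Int)) : List (Int × Int) :=
  let stevila : List Int := nabor_seznamov.foldl
    (fun stevila lst =>
      lst.foldl (fun stevila el => if el ∉ stevila then stevila ++ [el] else stevila) stevila) []
  stevila.foldl (fun opcije el =>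
    -- i ranges over range(len(nabor_seznamov)), so nabor_seznamov[i] never raises: pyGetD is exact here
    let r := (PySem.List.pyRange 0 (nabor_seznamov.length : Int) 1).foldl
      (fun (p : Int × Option Int) i =>
        if el ∈ PySem.List.pyGetD nabor_seznamov i [] then (p.1 + 1, some i) else p)
      (0, none)
    -- indeks is None only when pojavitev = 0, and then the branch below does not fire: getD 0 never supplies its default
    if r.1 == 1 then opcije ++ [(el, r.2.getD 0)] else opcije) []

-- ===== PORT B =====
def prestej_pojavitve_alt (nabor_seznamov : List (List Int)) : List (Int × Int) :=
  let info : PySem.Dict Int (Int × Int) := (PySem.List.enumerate nabor_seznamov 0).foldl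
    (fun info p =>
      (p.2.foldl (fun (st : PySem.Dict Int (Int × Int) × PySem.Set Int) el =>
          if ¬ st.2.contains el then
            (st.1.insert el ((st.1.getD el (0, 0)).1 + 1, p.1), PySem.Set.add st.2 el)
          else st)
        (info, PySem.Set.empty)).1)
    PySem.Dict.empty
  (info.items.filter (fun q => q.2.1 == 1)).map (fun q => (q.1, q.2.2))

-- ===== PRECONDITION & SPEC =====
def Spec_prestej_pojavitve (nabor_seznamov : List (List Int)) (out : List (Int × Int)) : Prop := out = prestej_pojavitve_alt nabor_seznamov
instance (nabor_seznamov : List (List Int)) (out : List (Int × Int)) : Decidable (Spec_prestej_pojavitve nabor_seznamov out) := by unfold Spec_prestej_pojavitve; infer_instance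

-- ===== CLAIM (what is proved, stated in full; the proofs are below) =====
def Claim_equal_prestej_pojavitve : Prop := ∀ (nabor_seznamov : List (List Int)), Dom_prestej_pojavitve nabor_seznamov → Spec_prestej_pojavitve nabor_seznamov (prestej_pojavitve nabor_seznamov)

-- ===== LEMMAS AND PROOFS =====

-- Reference value: for element el, (number of sublists containing el, index of the last one), init (0,0).
def pvV (nabor : List (List Int)) (el : Int) : Int × Int :=
  (PySem.List.enumerate nabor 0).foldl (fun p q => if el ∈ q.2 then (p.1 + 1, q.1) else p) (0, 0)

-- A's first loop builds Set.ofList of the flattened input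
lemma pv_stevila_eq (nabor : List (List Int)) :
    nabor.foldl
      (fun stevila lst =>
        lst.foldl (fun stevila el => if el ∉ stevila then stevila ++ [el] else stevila) stevila) []
      = PySem.Set.ofList nabor.flatten := by
  have hbody : ∀ (s : List Int) (e : Int),
      (if e ∉ s then s ++ [e] else s) = PySem.Set.add s e := by
    intro s e
    rw [PySem.Set.add_eq_ite]
    by_cases h : e ∈ s <;> simp [h]
  rw [PySem.Set.ofList_eq_foldl, ← List.foldl_flatten]
  simp only [hbody]

-- enumerate over an appended singleton
lemma pv_enumerate_append_singleton (xs : List (List Int)) (x : List Int) :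
    ∀ s : Int, PySem.List.enumerate (xs ++ [x]) s
      = PySem.List.enumerate xs s ++ [((s + xs.length : Int), x)] := by
  induction xs with
  | nil => intro s; simp [PySem.List.enumerate_cons, PySem.List.enumerate_nil]
  | cons y ys ih =>
      intro s
      simp only [List.cons_append, PySem.List.enumerate_cons, ih (s + 1), List.cons.injEq, true_and]
      have : s + 1 + (ys.length : Int) = s + ((y :: ys).length : Int) := by simp only [List.length_cons]; push_cast; ring
      rw [this]

-- pvV over an appended sublist
lemma pv_V_append (ns : List (List Int)) (lst : List Int) (el : Int) :
    pvV (ns ++ [lst]) el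
      = if el ∈ lst then ((pvV ns el).1 + 1, (ns.length : Int)) else pvV ns el := by
  unfold pvV
  rw [pv_enumerate_append_singleton ns lst 0, List.foldl_append]
  simp only [List.foldl_cons, List.foldl_nil, zero_add]

-- pvV is the initial state on elements occurring nowhere
lemma pv_V_not_mem (el : Int) :
    ∀ (xs : List (List Int)) (a : Int) (st : Int × Int), (∀ l ∈ xs, el ∉ l) →
      (PySem.List.enumerate xs a).foldl (fun p q => if el ∈ q.2 then (p.1 + 1, q.1) else p) st = st := by
  intro xs
  induction xs with
  | nil => intro a st _; simp [PySem.List.enumerate_nil]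
  | cons y ys ih =>
      intro a st h
      rw [PySem.List.enumerate_cons, List.foldl_cons]
      have hy : el ∉ y := h y (by simp)
      simp only [hy, if_neg, not_false_iff]
      exact ih (a + 1) st (fun l hl => h l (by simp [hl]))

-- A's index loop over range(len(..)) equals the same loop over enumerate
lemma pv_range_to_enum (full : List (List Int)) (el : Int) :
    ∀ (xs : List (List Int)) (a : Nat) (st : Int × Option Int),
      (∀ k : Nat, k < xs.length → PySem.List.pyGetD full ((a : Int) + (k : Int)) [] = xs.getD k []) →
      (PySem.List.pyRange (a : Int) ((a : Int) + (xs.length : Int)) 1).foldl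
          (fun (p : Int × Option Int) i =>
            if el ∈ PySem.List.pyGetD full i [] then (p.1 + 1, some i) else p) st
        = (PySem.List.enumerate xs (a : Int)).foldl
            (fun (p : Int × Option Int) q => if el ∈ q.2 then (p.1 + 1, some q.1) else p) st := by
  intro xs
  induction xs with
  | nil =>
      intro a st _
      rw [PySem.List.pyRange_one_eq_nil (by simp)]
      simp [PySem.List.enumerate_nil]
  | cons y ys ih =>
      intro a st h
      have hlt : (a : Int) < (a : Int) + ((y :: ys).length : Int) := by
        simp only [List.length_cons]; push_cast; omega
      rw [PySem.List.pyRange_one_cons hlt, List.foldl_cons, PySem.List.enumerate_cons,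
        List.foldl_cons]
      have h0 : PySem.List.pyGetD full (a : Int) [] = y := by
        have := h 0 (by simp)
        simpa using this
      rw [h0]
      have harith : (a : Int) + ((y :: ys).length : Int) = ((a + 1 : Nat) : Int) + (ys.length : Int) := by
        simp only [List.length_cons]; push_cast; omega
      have hcast : ((a : Int) + 1) = ((a + 1 : Nat) : Int) := by push_cast; omega
      rw [harith, hcast]
      have h' : ∀ k : Nat, k < ys.length →
          PySem.List.pyGetD full (((a + 1 : Nat) : Int) + (k : Int)) [] = ys.getD k [] := by
        intro k hk
        have := h (k + 1) (by simp; omega)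
        have harg : ((a : Int) + ((k + 1 : Nat) : Int)) = (((a + 1 : Nat) : Int) + (k : Int)) := by
          push_cast; omega
        rw [harg] at this
        simpa using this
      exact ih (a + 1) _ h'

-- the Option-carrying loop vs the pvV loop
lemma pv_opt_to_V (el : Int) :
    ∀ (xs : List (List Int)) (a c : Int) (o : Option Int) (d : Int),
      ((PySem.List.enumerate xs a).foldl
          (fun (p : Int × Option Int) q => if el ∈ q.2 then (p.1 + 1, some q.1) else p) (c, o)).1
        = ((PySem.List.enumerate xs a).foldl
            (fun (p : Int × Int) q => if el ∈ q.2 then (p.1 + 1, q.1) else p) (c, o.getD d)).1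
      ∧ ((PySem.List.enumerate xs a).foldl
          (fun (p : Int × Option Int) q => if el ∈ q.2 then (p.1 + 1, some q.1) else p) (c, o)).2.getD d
        = ((PySem.List.enumerate xs a).foldl
            (fun (p : Int × Int) q => if el ∈ q.2 then (p.1 + 1, q.1) else p) (c, o.getD d)).2 := by
  intro xs
  induction xs with
  | nil => intro a c o d; simp [PySem.List.enumerate_nil]
  | cons y ys ih =>
      intro a c o d
      rw [PySem.List.enumerate_cons]
      simp only [List.foldl_cons]
      by_cases hy : el ∈ y
      · simp only [hy, if_pos]
        have := ih (a + 1) (c + 1) (some a) d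
        simpa using this
      · simp only [hy, if_neg, not_false_iff]
        exact ih (a + 1) c o d

-- B's inner loop: the dict value at el
lemma pv_innerB_getD (i el : Int) :
    ∀ (lst : List Int) (d : PySem.Dict Int (Int × Int)) (s : PySem.Set Int),
      ((lst.foldl (fun (st : PySem.Dict Int (Int × Int) × PySem.Set Int) e =>
          if ¬ st.2.contains e then
            (st.1.insert e ((st.1.getD e (0, 0)).1 + 1, i), PySem.Set.add st.2 e)
          else st) (d, s)).1).getD el (0, 0)
        = if el ∈ lst ∧ el ∉ s then ((d.getD el (0, 0)).1 + 1, i) else d.getD el (0, 0) := by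
  intro lst
  induction lst with
  | nil => intro d s; simp
  | cons x lst ih =>
      intro d s
      simp only [List.foldl_cons]
      by_cases hx : x ∈ s
      · rw [if_neg (by simp [hx])]
        rw [ih d s]
        by_cases hs : el ∈ s
        · simp [hs]
        · by_cases hel : el = x
          · subst hel; exact absurd hx hs
          · simp [hel, hs]
      · rw [if_pos (by simp [hx])]
        rw [ih _ _]
        by_cases hel : el = x
        · subst hel
          rw [if_neg (by simp [PySem.Set.mem_add])]
          rw [PySem.Dict.getD_insert_self]
          simp [hx]
        · have h2 : (el ∈ lst ∧ el ∉ PySem.Set.add s x) ↔ (el ∈ x :: lst ∧ el ∉ s) := by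
            simp only [PySem.Set.mem_add, List.mem_cons]
            tauto
          rw [PySem.Dict.getD_insert_of_ne _ _ _ hel]
          by_cases hc : el ∈ lst ∧ el ∉ PySem.Set.add s x
          · rw [if_pos hc, if_pos (h2.mp hc)]
          · rw [if_neg hc, if_neg (fun h => hc (h2.mpr h))]

-- B's inner loop: the keys
lemma pv_innerB_keys (i : Int) :
    ∀ (lst : List Int) (d : PySem.Dict Int (Int × Int)) (s : PySem.Set Int),
      (∀ e ∈ s, e ∈ d.keys) →
      ((lst.foldl (fun (st : PySem.Dict Int (Int × Int) × PySem.Set Int) e =>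
          if ¬ st.2.contains e then
            (st.1.insert e ((st.1.getD e (0, 0)).1 + 1, i), PySem.Set.add st.2 e)
          else st) (d, s)).1).keys = PySem.Set.update d.keys lst := by
  intro lst
  induction lst with
  | nil => intro d s _; simp [PySem.Set.update]
  | cons x lst ih =>
      intro d s h
      have hupd : ∀ (K : PySem.Set Int),
          PySem.Set.update K (x :: lst) = PySem.Set.update (PySem.Set.add K x) lst := by
        intro K; simp [PySem.Set.update]
      simp only [List.foldl_cons]
      by_cases hx : x ∈ s
      · rw [if_neg (by simp [hx])]
        rw [ih d s h, hupd, PySem.Set.add_of_mem (h x hx)]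
      · rw [if_pos (by simp [hx])]
        have hkeys : (d.insert x ((d.getD x (0, 0)).1 + 1, i)).keys = PySem.Set.add d.keys x := by
          by_cases hc : d.contains x = true
          · rw [PySem.Dict.keys_insert_of_contains d _ hc,
              PySem.Set.add_of_mem ((PySem.Dict.contains_iff_mem_keys d x).mp hc)]
          · have hc' : d.contains x = false := by simpa using hc
            rw [PySem.Dict.keys_insert_of_not_contains d _ hc',
              PySem.Set.add_of_not_mem (fun hm => hc ((PySem.Dict.contains_iff_mem_keys d x).mpr hm))]
        have hinv : ∀ e ∈ PySem.Set.add s x, e ∈ (d.insert x ((d.getD x (0, 0)).1 + 1, i)).keys := by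
          intro e he
          rcases (PySem.Set.mem_add s x e).mp he with he | he
          · exact (PySem.Dict.mem_keys_insert d x e _).mpr (Or.inr (h e he))
          · exact (PySem.Dict.mem_keys_insert d x e _).mpr (Or.inl he)
        rw [ih _ _ hinv, hkeys, hupd]

-- B's inner loop: key uniqueness is preserved
lemma pv_innerB_nodup (i : Int) :
    ∀ (lst : List Int) (d : PySem.Dict Int (Int × Int)) (s : PySem.Set Int), d.keys.Nodup →
      ((lst.foldl (fun (st : PySem.Dict Int (Int × Int) × PySem.Set Int) e =>
          if ¬ st.2.contains e then
            (st.1.insert e ((st.1.getD e (0, 0)).1 + 1, i), PySem.Set.add st.2 e)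
          else st) (d, s)).1).keys.Nodup := by
  intro lst
  induction lst with
  | nil => intro d s h; simpa using h
  | cons x lst ih =>
      intro d s h
      simp only [List.foldl_cons]
      by_cases hx : x ∈ s
      · rw [if_neg (by simp [hx])]; exact ih d s h
      · rw [if_pos (by simp [hx])]
        exact ih _ _ (PySem.Dict.nodup_keys_insert _ _ _ h)

-- B's outer loop: the dict's items, characterized
lemma pv_outerB_items (nabor : List (List Int)) :
    ((PySem.List.enumerate nabor 0).foldl
        (fun info p =>
          (p.2.foldl (fun (st : PySem.Dict Int (Int × Int) × PySem.Set Int) el =>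
              if ¬ st.2.contains el then
                (st.1.insert el ((st.1.getD el (0, 0)).1 + 1, p.1), PySem.Set.add st.2 el)
              else st)
            (info, PySem.Set.empty)).1)
        PySem.Dict.empty).items
      = (PySem.Set.ofList nabor.flatten).map (fun el => (el, pvV nabor el)) := by
  induction nabor using List.reverseRecOn with
  | nil => rfl
  | append_singleton ns lst ih =>
      rw [pv_enumerate_append_singleton ns lst 0, List.foldl_append]
      simp only [List.foldl_cons, List.foldl_nil, zero_add]
      set d := (PySem.List.enumerate ns 0).foldl
        (fun info p =>
          (p.2.foldl (fun (st : PySem.Dict Int (Int × Int) × PySem.Set Int) el =>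
              if ¬ st.2.contains el then
                (st.1.insert el ((st.1.getD el (0, 0)).1 + 1, p.1), PySem.Set.add st.2 el)
              else st)
            (info, PySem.Set.empty)).1)
        PySem.Dict.empty with hd
      have hkeys : d.keys = PySem.Set.ofList ns.flatten := by
        simp only [PySem.Dict.keys, ih, List.map_map, Function.comp_def]
        simp
      have hnod : d.keys.Nodup := by rw [hkeys]; exact PySem.Set.nodup_ofList _
      have hgetD : ∀ el : Int, d.getD el (0, 0) =
          if el ∈ PySem.Set.ofList ns.flatten then pvV ns el else (0, 0) := by
        intro el
        by_cases hm : el ∈ PySem.Set.ofList ns.flatten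
        · rw [if_pos hm]
          exact PySem.Dict.getD_of_mem_items d
            (by rw [ih]; exact List.mem_map_of_mem hm) hnod (0, 0)
        · rw [if_neg hm]
          have hc : d.contains el = false := by
            by_contra hcc
            exact hm (hkeys ▸ (PySem.Dict.contains_iff_mem_keys d el).mp (by simpa using hcc))
          exact PySem.Dict.getD_of_not_contains d (0, 0) hc
      have hnod' := pv_innerB_nodup (ns.length : Int) lst d PySem.Set.empty hnod
      rw [PySem.Dict.items_eq_map_keys _ hnod' (0, 0)]
      have hK : ((lst.foldl (fun (st : PySem.Dict Int (Int × Int) × PySem.Set Int) e =>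
          if ¬ st.2.contains e then
            (st.1.insert e ((st.1.getD e (0, 0)).1 + 1, (ns.length : Int)), PySem.Set.add st.2 e)
          else st) (d, PySem.Set.empty)).1).keys = PySem.Set.update d.keys lst :=
        pv_innerB_keys (ns.length : Int) lst d PySem.Set.empty (by intro e he; simp [PySem.Set.empty] at he)
      have hS' : PySem.Set.ofList (ns ++ [lst]).flatten
          = PySem.Set.update (PySem.Set.ofList ns.flatten) lst := by
        simp [PySem.Set.ofList_eq_foldl, PySem.Set.update, List.foldl_append]
      rw [hK, hkeys, hS']
      apply List.map_congr_left
      intro el hel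
      have hmem : el ∈ PySem.Set.ofList ns.flatten ∨ el ∈ lst :=
        (PySem.Set.mem_update _ _ _).mp hel
      rw [pv_innerB_getD, pv_V_append]
      by_cases hl : el ∈ lst
      · rw [if_pos ⟨hl, by simp [PySem.Set.empty]⟩, if_pos hl, hgetD]
        by_cases hm : el ∈ PySem.Set.ofList ns.flatten
        · rw [if_pos hm]
        · rw [if_neg hm]
          have hz : pvV ns el = (0, 0) := by
            apply pv_V_not_mem
            intro l hlns hcon
            exact hm ((PySem.Set.mem_ofList _ _).mpr (List.mem_flatten.mpr ⟨l, hlns, hcon⟩))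
          rw [hz]
      · rw [if_neg (by simp [hl]), if_neg hl, hgetD]
        have hm : el ∈ PySem.Set.ofList ns.flatten := by
          rcases hmem with h | h
          · exact h
          · exact absurd h hl
        rw [if_pos hm]

-- ===== VERDICT (by name: the statement is the Claim_ definition above) =====
lemma pv_main (nabor : List (List Int)) :
    prestej_pojavitve nabor = prestej_pojavitve_alt nabor := by
  have hInner : ∀ el : Int,
      (((PySem.List.pyRange 0 (nabor.length : Int) 1).foldl
        (fun (p : Int × Option Int) i =>
          if el ∈ PySem.List.pyGetD nabor i [] then (p.1 + 1, some i) else p) (0, none)).1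
        = (pvV nabor el).1)
    ∧ (((PySem.List.pyRange 0 (nabor.length : Int) 1).foldl
        (fun (p : Int × Option Int) i =>
          if el ∈ PySem.List.pyGetD nabor i [] then (p.1 + 1, some i) else p) (0, none)).2.getD 0
        = (pvV nabor el).2) := by
    intro el
    have hre := pv_range_to_enum nabor el nabor 0 (0, none)
      (fun k hk => by simp [PySem.List.pyGetD_natCast])
    have h0 : ((0 : Nat) : Int) = (0 : Int) := by norm_num
    rw [h0, zero_add] at hre
    rw [hre]
    have hov := pv_opt_to_V el nabor 0 0 none 0
    simpa [pvV] using hov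
  simp only [prestej_pojavitve, prestej_pojavitve_alt]
  rw [pv_stevila_eq, pv_outerB_items]
  rw [PySem.List.foldl_append_if
      (fun el => ((PySem.List.pyRange 0 (nabor.length : Int) 1).foldl
          (fun (p : Int × Option Int) i =>
            if el ∈ PySem.List.pyGetD nabor i [] then (p.1 + 1, some i) else p) (0, none)).1 == 1)
      (fun el => (el, ((PySem.List.pyRange 0 (nabor.length : Int) 1).foldl
          (fun (p : Int × Option Int) i =>
            if el ∈ PySem.List.pyGetD nabor i [] then (p.1 + 1, some i) else p) (0, none)).2.getD 0))]
  rw [List.filter_map, List.map_map, List.nil_append]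
  have hp : (fun el => ((PySem.List.pyRange 0 (nabor.length : Int) 1).foldl
          (fun (p : Int × Option Int) i =>
            if el ∈ PySem.List.pyGetD nabor i [] then (p.1 + 1, some i) else p) (0, none)).1 == 1)
      = (fun el : Int => (pvV nabor el).1 == 1) :=
    funext fun el => by rw [(hInner el).1]
  have hf : (fun el => (el, ((PySem.List.pyRange 0 (nabor.length : Int) 1).foldl
          (fun (p : Int × Option Int) i =>
            if el ∈ PySem.List.pyGetD nabor i [] then (p.1 + 1, some i) else p) (0, none)).2.getD 0))
      = (fun el : Int => (el, (pvV nabor el).2)) :=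
    funext fun el => by rw [(hInner el).2]
  rw [hp, hf]
  simp only [Function.comp_def]

-- ===== VERDICT (by name: the statement is the Claim_ definition above) =====
theorem prestej_pojavitve_spec : Claim_equal_prestej_pojavitve := by
  unfold Claim_equal_prestej_pojavitve
  intro nabor _
  unfold Spec_prestej_pojavitve
  exact pv_main nabor
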